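-- pv_equiv track=rewrite | github.com/tcjackson9/MazeSolver | maze_solver.py | move_maze_first_part
-- ===== SOURCE A (Python) =====
-- def move_maze_first_part(direction, check_pos):
--     '''
--     This function has some of the first part of the move_maze function.
--     It sets a lot of variables that will be later used in the
--     move_maze function.
--     direction: String.
--     check_pos: Tuple.
--     '''
--     if direction == 'N':
--         pointer = ['^', '<', 'v', '>']
--     elif direction == 'E':
--         pointer = ['>', '^', '<', 'v']
--     elif direction == 'S':
--         pointer = ['v', '>', '^', '<']
--     else:
--         pointer = ['<', 'v', '>', '^']
--     position = []
--     for one in check_pos: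
--         position.append(one)
--     pos_x = position[0]
--     pos_y = position[1]
--     return pointer, pos_x, pos_y
-- ===== SOURCE B (Python) =====
-- def move_maze_first_part(direction, check_pos):
--     # The four tables in A are the rotations of one compass cycle; B searches
--     # for the rotation whose head is the direction's arrow by rotating left.
--     arrow = {'N': '^', 'E': '>', 'S': 'v'}.get(direction, '<')
--     pointer = ['^', '<', 'v', '>']
--     while pointer[0] != arrow:
--         pointer = pointer[1:] + pointer[:1]
--     pos_x, pos_y = check_pos
--     return pointer, pos_x, pos_y
-- ===== Notes on version B (the rewrite author's own statement) =====
-- stated objective: alternative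
-- what changed: B replaces A's four hardcoded literal branches by a search loop: it maps the direction to its arrow character and rotates a single compass cycle left until that arrow is at the head, instead of selecting among four precomputed lists; the tuple is unpacked directly rather than copied into a list.
import Mathlib
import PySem

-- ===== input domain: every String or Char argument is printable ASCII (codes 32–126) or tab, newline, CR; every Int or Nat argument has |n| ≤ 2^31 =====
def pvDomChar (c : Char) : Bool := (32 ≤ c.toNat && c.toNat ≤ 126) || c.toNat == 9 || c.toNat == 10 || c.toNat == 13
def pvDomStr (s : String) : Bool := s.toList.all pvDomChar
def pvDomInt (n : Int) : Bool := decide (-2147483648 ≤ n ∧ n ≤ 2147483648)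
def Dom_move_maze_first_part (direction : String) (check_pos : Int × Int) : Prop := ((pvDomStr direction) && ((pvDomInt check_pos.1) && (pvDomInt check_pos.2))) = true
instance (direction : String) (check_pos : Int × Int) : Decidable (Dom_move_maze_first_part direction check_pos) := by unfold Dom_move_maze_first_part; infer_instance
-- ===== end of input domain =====

-- B finds the pointer list by rotating one compass cycle left until the direction's
-- arrow is at the head, instead of A's four hardcoded literal branches (objective: alternative).


-- ===== PORT A =====
def move_maze_first_part (direction : String) (check_pos : Int × Int) : List String × Int × Int :=
  let pointer :=
    if direction = "N" then ["^", "<", "v", ">"]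
    else if direction = "E" then [">", "^", "<", "v"]
    else if direction = "S" then ["v", ">", "^", "<"]
    else ["<", "v", ">", "^"]
  -- 'for one in check_pos: position.append(one)' over the 2-tuple
  let position := List.foldl (fun acc one => acc ++ [one]) [] [check_pos.1, check_pos.2]
  let pos_x := PySem.List.pyGetD position 0 0   -- position[0]; always in range (2-element list)
  let pos_y := PySem.List.pyGetD position 1 0   -- position[1]; always in range
  (pointer, pos_x, pos_y)

-- ===== PORT B =====
-- the 'while pointer[0] != arrow' loop; fuel 4 only makes it total (the arrow is
-- always in the 4-cycle, so at most 3 rotations happen)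
def pvRotUntil (arrow : String) : Nat → List String → List String
  | 0, p => p
  | n+1, p =>
    if PySem.List.pyGetD p 0 "" = arrow then p
    else pvRotUntil arrow n (PySem.List.slice p (some 1) none ++ PySem.List.slice p none (some 1))

def move_maze_first_part_alt (direction : String) (check_pos : Int × Int) : List String × Int × Int :=
  let arrow := PySem.Dict.getD (PySem.Dict.ofList [("N", "^"), ("E", ">"), ("S", "v")]) direction "<"
  let pointer := pvRotUntil arrow 4 ["^", "<", "v", ">"]
  (pointer, check_pos.1, check_pos.2)

-- ===== PRECONDITION & SPEC =====
def Spec_move_maze_first_part (direction : String) (check_pos : Int × Int) (out : List String × Int × Int) : Prop := out = move_maze_first_part_alt direction check_pos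
instance (direction : String) (check_pos : Int × Int) (out : List String × Int × Int) : Decidable (Spec_move_maze_first_part direction check_pos out) := by unfold Spec_move_maze_first_part; infer_instance

-- ===== CLAIM (what is proved, stated in full; the proofs are below) =====
def Claim_equal_move_maze_first_part : Prop := ∀ (direction : String) (check_pos : Int × Int), Dom_move_maze_first_part direction check_pos → Spec_move_maze_first_part direction check_pos (move_maze_first_part direction check_pos)

-- ===== LEMMAS AND PROOFS =====

-- ===== VERDICT (by name: the statement is the Claim_ definition above) =====
theorem move_maze_first_part_spec : Claim_equal_move_maze_first_part := by
  intro direction check_pos _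
  unfold Spec_move_maze_first_part move_maze_first_part move_maze_first_part_alt
  have hd : PySem.Dict.ofList [("N", "^"), ("E", ">"), ("S", "v")]
      = PySem.Dict.mk [("N", "^"), ("E", ">"), ("S", "v")] := by decide
  by_cases hN : direction = "N"
  · subst hN
    simp [hd, PySem.Dict.getD_eq_get?_getD, PySem.Dict.get?_mk_cons, pvRotUntil,
      PySem.List.slice, PySem.List.clampIdx, PySem.List.pyGetD, PySem.List.pyIdx?,
      PySem.List.pyGet?, List.foldl]
  · by_cases hE : direction = "E"
    · subst hE
      simp [hd, PySem.Dict.getD_eq_get?_getD, PySem.Dict.get?_mk_cons, pvRotUntil,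
        PySem.List.slice, PySem.List.clampIdx, PySem.List.pyGetD, PySem.List.pyIdx?,
        PySem.List.pyGet?, List.foldl]
    · by_cases hS : direction = "S"
      · subst hS
        simp [hd, PySem.Dict.getD_eq_get?_getD, PySem.Dict.get?_mk_cons, pvRotUntil,
          PySem.List.slice, PySem.List.clampIdx, PySem.List.pyGetD, PySem.List.pyIdx?,
          PySem.List.pyGet?, List.foldl]
      · simp [hN, hE, hS, hd, PySem.Dict.getD_eq_get?_getD, pvRotUntil,
          beq_iff_eq, Ne.symm hN, Ne.symm hE, Ne.symm hS, PySem.Dict.get?,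
          PySem.List.slice, PySem.List.clampIdx, PySem.List.pyGetD, PySem.List.pyIdx?,
          PySem.List.pyGet?, List.foldl]
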